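-- pv_equiv track=rewrite | github.com/jyh/jas | jas/algorithms/hyphenator.py | hyphenate
-- ===== SOURCE A (Python) =====
-- def split_pattern(pat: str) -> tuple[str, list[int]]:
--     """Split a TeX hyphenation pattern into its letter sequence and
--     per-position digit list. ``2'2`` -> letters="'", digits=[2,2]
--     (digit at position 0, between, after). The digit list has length
--     ``len(letters) + 1``; positions with no digit get 0."""
--     letters: list[str] = []
--     digits: list[int] = []
--     pending: int | None = None
--     for c in pat:
--         if "0" <= c <= "9":
--             pending = ord(c) - ord("0")
--         else:
--             digits.append(pending if pending is not None else 0)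
--             pending = None
--             letters.append(c)
--     digits.append(pending if pending is not None else 0)
--     return ("".join(letters), digits)
--
-- def hyphenate(word: str, patterns: list[str], min_before: int, min_after: int) -> list[bool]:
--     """Compute valid break positions in ``word`` per the given
--     patterns. Returns a ``list[bool]`` of length ``len(word) + 1``
--     where ``breaks[i] = True`` means a break is permitted between
--     chars i-1 and i. Indices 0 and ``len(word)`` are always False
--     (no break before first or after last char). Patterns are case-
--     folded; the input word is lowercased for matching.
--
--     ``min_before`` and ``min_after`` enforce the dialog "After First
--     N letters" / "Before Last N letters" constraints — break points
--     within the first ``min_before`` or last ``min_after`` characters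
--     are suppressed."""
--     n = len(word)
--     if n == 0:
--         return []
--     levels = [0] * (n + 1)
--     lower = word.lower()
--     padded = "." + lower + "."
--     plen = len(padded)
--     for pat in patterns:
--         letters, digits = split_pattern(pat)
--         pn = len(letters)
--         if pn == 0 or pn > plen:
--             continue
--         for start in range(plen - pn + 1):
--             if padded[start:start + pn] == letters:
--                 for i, lvl in enumerate(digits):
--                     if lvl == 0:
--                         continue
--                     padded_pos = start + i
--                     if padded_pos == 0 or padded_pos > n:
--                         continue
--                     unpadded_pos = padded_pos - 1
--                     if unpadded_pos > n:
--                         continue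
--                     if levels[unpadded_pos] < lvl:
--                         levels[unpadded_pos] = lvl
--     breaks = [False] * (n + 1)
--     upper = max(0, n - min_after)
--     for i in range(n + 1):
--         if i < min_before or i > upper:
--             continue
--         if levels[i] % 2 == 1:
--             breaks[i] = True
--     return breaks
-- ===== SOURCE B (Python) =====
-- def split_pattern(pat: str) -> tuple[str, list[int]]:
--     letters: list[str] = []
--     digits: list[int] = []
--     pending: int | None = None
--     for c in pat:
--         if "0" <= c <= "9":
--             pending = ord(c) - ord("0")
--         else:
--             digits.append(pending if pending is not None else 0)
--             pending = None
--             letters.append(c)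
--     digits.append(pending if pending is not None else 0)
--     return ("".join(letters), digits)
--
-- def hyphenate(word: str, patterns: list[str], min_before: int, min_after: int) -> list[bool]:
--     n = len(word)
--     if n == 0:
--         return []
--     padded = "." + word.lower() + "."
--     plen = len(padded)
--     # first pass: collect every (position, level) contribution of every pattern
--     # match into one flat event list (no mutable levels array)
--     events: list[tuple[int, int]] = []
--     for pat in patterns:
--         letters, digits = split_pattern(pat)
--         if not letters:
--             continue
--         for start in range(plen - len(letters) + 1):
--             if padded.startswith(letters, start):
--                 events.extend((start + i - 1, lvl)
--                               for i, lvl in enumerate(digits)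
--                               if lvl and 1 <= start + i <= n)
--     # second pass: each position's level is the max of its contributions
--     upper = max(0, n - min_after)
--     return [min_before <= i <= upper
--             and max([0] + [lvl for p, lvl in events if p == i]) % 2 == 1
--             for i in range(n + 1)]
-- ===== Notes on version B (the rewrite author's own statement) =====
-- stated objective: alternative
-- what changed: A mutates a levels array in place with conditional max-bumps inside the pattern/offset scan; B is purely functional and staged: it first collects all (position, level) contributions of every pattern match into one flat event list (matching via str.startswith), then computes each position's level as max of its contributions in a final comprehension.
import Mathlib
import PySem

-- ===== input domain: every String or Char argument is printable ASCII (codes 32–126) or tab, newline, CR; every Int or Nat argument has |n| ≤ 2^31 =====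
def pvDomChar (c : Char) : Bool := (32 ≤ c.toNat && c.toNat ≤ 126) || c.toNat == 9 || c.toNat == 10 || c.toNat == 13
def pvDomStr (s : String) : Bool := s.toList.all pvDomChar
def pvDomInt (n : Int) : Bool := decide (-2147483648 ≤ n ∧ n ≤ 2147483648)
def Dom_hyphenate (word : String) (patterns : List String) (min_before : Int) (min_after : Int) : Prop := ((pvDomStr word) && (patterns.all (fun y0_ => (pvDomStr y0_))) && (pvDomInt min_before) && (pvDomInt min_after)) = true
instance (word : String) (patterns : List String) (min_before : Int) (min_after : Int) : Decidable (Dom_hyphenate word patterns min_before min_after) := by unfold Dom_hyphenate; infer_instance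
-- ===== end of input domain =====

-- B replaces A's in-place max-bumped levels array by two functional stages: collect all
-- (position, level) contributions of all pattern matches into one flat event list, then
-- take each position's max in a final comprehension (objective: alternative decomposition).

-- ===== PORT A =====
-- split_pattern (shared module helper, used verbatim by both A and B); letters kept as List Char ("".join of 1-char strings)
def pvSplitPat (pat : List Char) : List Char × List Int :=
  let st := pat.foldl (fun (st : List Char × List Int × Option Int) c =>
      if '0' ≤ c ∧ c ≤ '9' then (st.1, st.2.1, some ((c.toNat : Int) - 48))
      else (st.1 ++ [c], st.2.1 ++ [st.2.2.getD 0], none))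
    ([], [], none)
  (st.1, st.2.1 ++ [st.2.2.getD 0])

-- A's 'if levels[unpadded_pos] < lvl: levels[unpadded_pos] = lvl'
def pvBump (levels : List Int) (p : Nat) (lvl : Int) : List Int :=
  if levels.getD p 0 < lvl then levels.set p lvl else levels

-- A's 'for i, lvl in enumerate(digits)' body, with A's guards (incl. the redundant 'unpadded_pos > n' check)
def pvApplyA (n start : Nat) (digits : List Int) (levels : List Int) : List Int :=
  digits.zipIdx.foldl (fun levels li =>
    if li.1 = 0 then levels
    else if start + li.2 = 0 ∨ n < start + li.2 then levels
    else if n < start + li.2 - 1 then levels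
    else pvBump levels (start + li.2 - 1) li.1) levels

def hyphenate (word : String) (patterns : List String) (min_before : Int) (min_after : Int) : List Bool :=
  let n := word.toList.length
  if n = 0 then [] else
  let padded : List Char := '.' :: PySem.Chars.lower word.toList ++ ['.']
  let plen := padded.length
  let levels := patterns.foldl (fun levels pat =>
      let sd := pvSplitPat pat.toList
      if sd.1.length = 0 ∨ plen < sd.1.length then levels
      else (List.range (plen - sd.1.length + 1)).foldl (fun levels start =>
        if (padded.drop start).take sd.1.length = sd.1 then pvApplyA n start sd.2 levels
        else levels) levels)
    (List.replicate (n+1) (0:Int))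
  let upper : Int := max 0 ((n:Int) - min_after)
  (List.range (n+1)).map (fun (i : Nat) =>
    if (i:Int) < min_before ∨ upper < (i:Int) then false
    else decide (PySem.Int.mod (levels.getD i 0) 2 = 1))

-- ===== PORT B =====
-- the contributions one match at 'start' generates: B's
-- '(start + i - 1, lvl) for i, lvl in enumerate(digits) if lvl and 1 <= start + i <= n'
def pvContrib (n start : Nat) (digits : List Int) : List (Nat × Int) :=
  digits.zipIdx.filterMap (fun li =>
    if li.1 ≠ 0 ∧ 1 ≤ start + li.2 ∧ start + li.2 ≤ n then some (start + li.2 - 1, li.1) else none)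

-- B's event-collection loop; 'range(plen - pn + 1)' is Nat-truncated 'List.range (plen + 1 - pn)'
-- (empty when pn > plen, exactly like Python's empty range on a negative stop);
-- 'padded.startswith(letters, start)' is PySem.Chars.startswith on the dropped suffix (start ≥ 0)
def pvEventsAll (n plen : Nat) (padded : List Char) (patterns : List String) : List (Nat × Int) :=
  patterns.foldl (fun evs pat =>
    let sd := pvSplitPat pat.toList
    if sd.1.length = 0 then evs
    else (List.range (plen + 1 - sd.1.length)).foldl (fun evs start =>
      if PySem.Chars.startswith (padded.drop start) sd.1 then evs ++ pvContrib n start sd.2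
      else evs) evs) []

def hyphenate_alt (word : String) (patterns : List String) (min_before : Int) (min_after : Int) : List Bool :=
  let n := word.toList.length
  if n = 0 then [] else
  let padded : List Char := '.' :: PySem.Chars.lower word.toList ++ ['.']
  let events := pvEventsAll n padded.length padded patterns
  let upper : Int := max 0 ((n:Int) - min_after)
  -- 'max([0] + lst)' is the running-max loop 'lst.foldl max 0' (PySem.List.max?_id_cons)
  (List.range (n+1)).map (fun (i : Nat) =>
    decide (min_before ≤ (i:Int) ∧ (i:Int) ≤ upper ∧
      PySem.Int.mod ((events.filterMap (fun e => if e.1 = i then some e.2 else none)).foldl max 0) 2 = 1))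

-- ===== PRECONDITION & SPEC =====
def Spec_hyphenate (word : String) (patterns : List String) (min_before : Int) (min_after : Int) (out : List Bool) : Prop := out = hyphenate_alt word patterns min_before min_after
instance (word : String) (patterns : List String) (min_before : Int) (min_after : Int) (out : List Bool) : Decidable (Spec_hyphenate word patterns min_before min_after out) := by unfold Spec_hyphenate; infer_instance

-- ===== CLAIM (what is proved, stated in full; the proofs are below) =====
def Claim_equal_hyphenate : Prop := ∀ (word : String) (patterns : List String) (min_before : Int) (min_after : Int), Dom_hyphenate word patterns min_before min_after → Spec_hyphenate word patterns min_before min_after (hyphenate word patterns min_before min_after)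

-- ===== LEMMAS AND PROOFS =====

def pvBumpAll (evs : List (Nat × Int)) (levels : List Int) : List Int :=
  evs.foldl (fun ls e => pvBump ls e.1 e.2) levels

-- the event list as a flatMap, for reasoning
def pvFlatEvents (n plen : Nat) (padded : List Char) (patterns : List String) : List (Nat × Int) :=
  patterns.flatMap (fun pat =>
    let sd := pvSplitPat pat.toList
    if sd.1.length = 0 then []
    else (List.range (plen + 1 - sd.1.length)).flatMap (fun start =>
      if PySem.Chars.startswith (padded.drop start) sd.1 then pvContrib n start sd.2 else []))

-- generic: a fold whose body folds a sublist is a fold over the flatMap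
lemma pv_foldl_flatMap {α β γ : Type} (l : List α) (g : α → List β) (f : γ → β → γ) (init : γ) :
    (l.flatMap g).foldl f init = l.foldl (fun acc x => (g x).foldl f acc) init := by
  induction l generalizing init with
  | nil => rfl
  | cons x t ih => simp [List.flatMap_cons, List.foldl_append, ih]

-- B's accumulated event list IS the flatMap
lemma pvEventsAll_eq (n plen : Nat) (padded : List Char) (patterns : List String) :
    pvEventsAll n plen padded patterns = pvFlatEvents n plen padded patterns := by
  unfold pvEventsAll pvFlatEvents
  suffices h : ∀ (acc : List (Nat × Int)),
      patterns.foldl (fun evs pat =>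
        let sd := pvSplitPat pat.toList
        if sd.1.length = 0 then evs
        else (List.range (plen + 1 - sd.1.length)).foldl (fun evs start =>
          if PySem.Chars.startswith (padded.drop start) sd.1 then evs ++ pvContrib n start sd.2
          else evs) evs) acc
      = acc ++ patterns.flatMap (fun pat =>
          let sd := pvSplitPat pat.toList
          if sd.1.length = 0 then []
          else (List.range (plen + 1 - sd.1.length)).flatMap (fun start =>
            if PySem.Chars.startswith (padded.drop start) sd.1 then pvContrib n start sd.2 else [])) by
    simpa using h []
  induction patterns with
  | nil => intro acc; simp
  | cons pat t ih =>
    intro acc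
    simp only [List.foldl_cons, List.flatMap_cons]
    by_cases h0 : (pvSplitPat pat.toList).1.length = 0
    · simp only [h0, ih]
      simp
    · simp only [if_neg h0, ih]
      have hinner : ∀ (a : List (Nat × Int)),
          (List.range (plen + 1 - (pvSplitPat pat.toList).1.length)).foldl (fun evs start =>
            if PySem.Chars.startswith (padded.drop start) (pvSplitPat pat.toList).1 then
              evs ++ pvContrib n start (pvSplitPat pat.toList).2
            else evs) a
          = a ++ (List.range (plen + 1 - (pvSplitPat pat.toList).1.length)).flatMap (fun start =>
              if PySem.Chars.startswith (padded.drop start) (pvSplitPat pat.toList).1 then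
                pvContrib n start (pvSplitPat pat.toList).2 else []) := by
        intro a
        rw [← PySem.List.foldl_append_eq_flatMap]
        apply PySem.List.foldl_congr_mem
        intro acc start _
        by_cases hs : PySem.Chars.startswith (padded.drop start) (pvSplitPat pat.toList).1 = true <;>
          simp [hs]
      simp only [hinner, List.append_assoc]

lemma pvApplyA_eq (n start : Nat) (ds : List Int) (ls : List Int) :
    pvApplyA n start ds ls = pvBumpAll (pvContrib n start ds) ls := by
  unfold pvApplyA pvContrib pvBumpAll
  generalize ds.zipIdx = l
  induction l generalizing ls with
  | nil => rfl
  | cons li t ih =>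
    simp only [List.foldl_cons, List.filterMap_cons]
    by_cases h1 : li.1 = 0
    · rw [if_pos h1,
        if_neg (fun hc : li.1 ≠ 0 ∧ _ => hc.1 h1)]
      exact ih ls
    · by_cases h2 : start + li.2 = 0 ∨ n < start + li.2
      · rw [if_neg h1, if_pos h2,
          if_neg (fun hc : _ ∧ 1 ≤ start + li.2 ∧ start + li.2 ≤ n => by omega)]
        exact ih ls
      · have h3 : ¬ n < start + li.2 - 1 := by omega
        rw [if_neg h1, if_neg h2, if_neg h3,
          if_pos (⟨h1, by omega, by omega⟩ : li.1 ≠ 0 ∧ 1 ≤ start + li.2 ∧ start + li.2 ≤ n)]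
        simp only [List.foldl_cons]
        exact ih _

-- A's nested levels fold bumps exactly the flat event list, in order
lemma pv_A_levels (n plen : Nat) (padded : List Char) (patterns : List String) (init : List Int) :
    patterns.foldl (fun levels pat =>
      let sd := pvSplitPat pat.toList
      if sd.1.length = 0 ∨ plen < sd.1.length then levels
      else (List.range (plen - sd.1.length + 1)).foldl (fun levels start =>
        if (padded.drop start).take sd.1.length = sd.1 then pvApplyA n start sd.2 levels
        else levels) levels) init
    = pvBumpAll (pvFlatEvents n plen padded patterns) init := by
  unfold pvFlatEvents pvBumpAll
  rw [pv_foldl_flatMap]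
  apply PySem.List.foldl_congr_mem
  intro levels pat _
  simp only
  by_cases h0 : (pvSplitPat pat.toList).1.length = 0
  · simp [h0]
  · by_cases hbig : plen < (pvSplitPat pat.toList).1.length
    · have hr : plen + 1 - (pvSplitPat pat.toList).1.length = 0 := by omega
      rw [if_pos (Or.inr hbig), if_neg h0, hr]
      simp
    · rw [if_neg (by tauto), if_neg h0]
      have hr : plen + 1 - (pvSplitPat pat.toList).1.length
          = plen - (pvSplitPat pat.toList).1.length + 1 := by omega
      rw [hr, pv_foldl_flatMap]
      apply PySem.List.foldl_congr_mem
      intro ls start _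
      by_cases hm : (padded.drop start).take (pvSplitPat pat.toList).1.length
          = (pvSplitPat pat.toList).1
      · have hpre : PySem.Chars.startswith (padded.drop start) (pvSplitPat pat.toList).1 = true := by
          rw [PySem.Chars.startswith_iff, List.prefix_iff_eq_take]
          exact hm.symm
        rw [if_pos hm, hpre, if_pos rfl, pvApplyA_eq]
        rfl
      · have hpre : ¬ PySem.Chars.startswith (padded.drop start) (pvSplitPat pat.toList).1 = true := by
          rw [PySem.Chars.startswith_iff, List.prefix_iff_eq_take]
          exact fun h => hm h.symm
        rw [if_neg hm, if_neg hpre]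
        rfl

lemma pv_length_bump (ls : List Int) (p : Nat) (lvl : Int) :
    (pvBump ls p lvl).length = ls.length := by
  unfold pvBump; split <;> simp

-- levels after all bumps: each position holds the running max of its events
lemma pv_bumpAll_getD (evs : List (Nat × Int)) (ls : List Int)
    (h : ∀ e ∈ evs, e.1 < ls.length) (j : Nat) :
    (pvBumpAll evs ls).getD j 0
      = List.foldl max (ls.getD j 0) (evs.filterMap (fun e => if e.1 = j then some e.2 else none)) := by
  induction evs generalizing ls with
  | nil => rfl
  | cons e t ih =>
    have he : e.1 < ls.length := h e (by simp)
    have hb : (pvBump ls e.1 e.2).getD j 0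
        = if e.1 = j then max (ls.getD j 0) e.2 else ls.getD j 0 := by
      unfold pvBump
      by_cases hej : e.1 = j
      · subst hej
        by_cases hlt : ls.getD e.1 0 < e.2
        · rw [if_pos hlt, if_pos rfl, List.getD_eq_getElem?_getD, List.getElem?_set_self (by omega)]
          rw [List.getD_eq_getElem?_getD] at hlt
          simp; omega
        · rw [if_neg hlt, if_pos rfl]; omega
      · by_cases hlt : ls.getD e.1 0 < e.2
        · rw [if_pos hlt, if_neg hej, List.getD_eq_getElem?_getD, List.getElem?_set_ne (by omega),
              ← List.getD_eq_getElem?_getD]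
        · rw [if_neg hlt, if_neg hej]
    show (pvBumpAll t (pvBump ls e.1 e.2)).getD j 0 = _
    rw [ih (pvBump ls e.1 e.2) (fun e' he' => by rw [pv_length_bump]; exact h e' (by simp [he'])), hb]
    by_cases hej : e.1 = j <;> simp [hej]

lemma pv_mem_contrib_lt (n start : Nat) (ds : List Int) (e : Nat × Int)
    (h : e ∈ pvContrib n start ds) : e.1 < n + 1 := by
  unfold pvContrib at h
  simp only [List.mem_filterMap] at h
  obtain ⟨li, _, hli⟩ := h
  split at hli
  · cases hli; omega
  · cases hli

lemma pv_mem_flatEvents_lt (n plen : Nat) (padded : List Char) (patterns : List String)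
    (e : Nat × Int) (h : e ∈ pvFlatEvents n plen padded patterns) : e.1 < n + 1 := by
  unfold pvFlatEvents at h
  simp only [List.mem_flatMap] at h
  obtain ⟨pat, _, h⟩ := h
  split at h
  · cases h
  · simp only [List.mem_flatMap] at h
    obtain ⟨start, _, h⟩ := h
    split at h
    · exact pv_mem_contrib_lt n start _ e h
    · cases h

-- A's suppression guard 'continue if i < min_before or i > upper' as B's conjunction
lemma pv_gate (x lo hi : Int) (r : Prop) [Decidable r] :
    (if x < lo ∨ hi < x then false else decide r) = decide (lo ≤ x ∧ x ≤ hi ∧ r) := by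
  by_cases h : x < lo ∨ hi < x
  · rw [if_pos h, eq_comm, decide_eq_false_iff_not]
    rintro ⟨h1, h2, _⟩
    omega
  · rw [if_neg h, decide_eq_decide]
    constructor
    · intro hr
      exact ⟨by omega, by omega, hr⟩
    · rintro ⟨_, _, hr⟩
      exact hr

lemma pv_replicate_getD (m i : Nat) : (List.replicate m (0:Int)).getD i 0 = 0 := by
  rw [List.getD_eq_getElem?_getD, List.getElem?_replicate]
  split <;> rfl

-- ===== VERDICT (by name: the statement is the Claim_ definition above) =====
theorem hyphenate_spec : Claim_equal_hyphenate := by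
  intro word patterns min_before min_after _
  unfold Spec_hyphenate hyphenate hyphenate_alt
  by_cases hn : word.toList.length = 0
  · simp [hn]
  · simp only [if_neg hn]
    rw [pvEventsAll_eq, pv_A_levels]
    apply List.map_congr_left
    intro i hi
    have hi' : i < word.toList.length + 1 := List.mem_range.mp hi
    rw [pv_bumpAll_getD _ _ (fun e he => by
      rw [List.length_replicate]; exact pv_mem_flatEvents_lt _ _ _ _ e he) i,
      pv_replicate_getD]
    exact pv_gate _ _ _ _
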